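-- pv_equiv track=rewrite | github.com/xudd/xudd | xudd/demos/lotsamessages.py | worker_allocation
-- ===== SOURCE A (Python) =====
-- def worker_allocation(jobs, workers):
--     """
--     Return jobs allocated to workers.  Lazy implementation.
--
--     Given an iterable of jobs to be processed, and an iterable of
--     available workers, it lines 'em up!
--     """
--     worker_len = len(workers)
--     assert worker_len != 0
--     current_worker = 0
--
--     allocation = []
--
--     for job in jobs:
--         allocation.append((job, workers[current_worker]))
--
--         current_worker += 1
--         if current_worker >= worker_len:
--             current_worker = 0
--
--     return allocation
-- ===== SOURCE B (Python) =====
-- def worker_allocation(jobs, workers):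
--     worker_len = len(workers)
--     assert worker_len != 0
--     allocation = []
--     for start in range(0, len(jobs), worker_len):
--         allocation.extend(zip(jobs[start:start + worker_len], workers))
--     return allocation
-- ===== Notes on version B (the rewrite author's own statement) =====
-- stated objective: alternative
-- what changed: Replaces the per-job loop with its counter and wraparound reset by a round-batched pass: the outer loop steps over jobs in slices of worker_len and pairs each whole slice against the full workers list with zip, so no per-element worker index is ever maintained.
import Mathlib
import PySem

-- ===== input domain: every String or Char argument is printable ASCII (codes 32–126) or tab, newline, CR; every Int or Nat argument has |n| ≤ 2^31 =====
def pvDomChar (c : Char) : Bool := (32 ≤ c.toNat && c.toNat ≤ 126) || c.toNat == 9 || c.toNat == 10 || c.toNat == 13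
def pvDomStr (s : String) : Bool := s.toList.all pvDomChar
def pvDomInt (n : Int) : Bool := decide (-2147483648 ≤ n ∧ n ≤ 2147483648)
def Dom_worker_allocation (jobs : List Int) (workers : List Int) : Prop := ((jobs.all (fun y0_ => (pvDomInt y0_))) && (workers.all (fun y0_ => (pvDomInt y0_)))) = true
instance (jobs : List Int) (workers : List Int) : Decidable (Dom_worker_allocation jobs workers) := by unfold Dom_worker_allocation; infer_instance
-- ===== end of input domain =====

-- B replaces A's per-job counter/wraparound loop with a round-batched pass (slice per round, zip against the full workers list); return-value equivalence on nonempty workers.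
-- Pre_ excludes empty workers, on which A raises AssertionError (B's assert raises there too).


-- ===== PORT A =====
-- A's for-loop: counter current_worker, reset to 0 when it reaches worker_len; accumulator appended to.
-- workers[current_worker]: always in range (0 ≤ cw < worker_len is an invariant under Pre_), so getD is exact here.
def workerAllocGoA (workers : List Int) : List Int → Nat → List (Int × Int) → List (Int × Int)
  | [], _, acc => acc.reverse
  | j :: js, cw, acc =>
      let acc' := (j, workers.getD cw 0) :: acc
      let cw' := cw + 1
      let cw'' := if cw' ≥ workers.length then 0 else cw'
      workerAllocGoA workers js cw'' acc'

def worker_allocation (jobs : List Int) (workers : List Int) : List (Int × Int) :=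
  workerAllocGoA workers jobs 0 []

-- ===== PORT B =====
-- B's outer loop over range(0, len(jobs), worker_len): each iteration zips the next slice of
-- jobs against the whole workers list and extends the accumulator; recursion on the remaining jobs.
-- The 'wl = 0' branch is only a totality guard (unreachable under Pre_: Python's assert has raised).
def workerAllocRounds (wl : Nat) (workers : List Int) : List Int → List (Int × Int)
  | [] => []
  | j :: js =>
      if _h : wl = 0 then []
      else ((j :: js).take wl).zip workers ++ workerAllocRounds wl workers ((j :: js).drop wl)
termination_by js => js.length
decreasing_by simp [List.length_drop]; omega

def worker_allocation_alt (jobs : List Int) (workers : List Int) : List (Int × Int) :=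
  workerAllocRounds workers.length workers jobs

-- ===== PRECONDITION & SPEC =====
-- A raises AssertionError when workers is empty (B's assert raises there too).
def Pre_worker_allocation (jobs : List Int) (workers : List Int) : Prop := workers ≠ []
instance (jobs : List Int) (workers : List Int) : Decidable (Pre_worker_allocation jobs workers) := by unfold Pre_worker_allocation; infer_instance
def pvWitness_worker_allocation : List Int × List Int := ([1, 2, 3, 4, 5], [10, 20])

def Spec_worker_allocation (jobs : List Int) (workers : List Int) (out : List (Int × Int)) : Prop := out = worker_allocation_alt jobs workers
instance (jobs : List Int) (workers : List Int) (out : List (Int × Int)) : Decidable (Spec_worker_allocation jobs workers out) := by unfold Spec_worker_allocation; infer_instance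

-- ===== CLAIM (what is proved, stated in full; the proofs are below) =====
def Claim_equal_worker_allocation : Prop := ∀ (jobs : List Int) (workers : List Int), Dom_worker_allocation jobs workers → Pre_worker_allocation jobs workers → Spec_worker_allocation jobs workers (worker_allocation jobs workers)

-- ===== LEMMAS AND PROOFS =====

-- A's accumulator can be pulled out in front.
theorem workerAllocGoA_acc (ws : List Int) :
    ∀ (js : List Int) (cw : Nat) (acc : List (Int × Int)),
      workerAllocGoA ws js cw acc = acc.reverse ++ workerAllocGoA ws js cw [] := by
  intro js
  induction js with
  | nil => intro cw acc; simp [workerAllocGoA]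
  | cons j rest ih =>
    intro cw acc
    rw [workerAllocGoA, workerAllocGoA]
    rw [ih _ ((j, ws.getD cw 0) :: acc), ih _ [(j, ws.getD cw 0)]]
    simp

-- One round of A (starting at counter cw < wl) produces the zip of the remaining slice of this
-- round against workers.drop cw, then restarts at counter 0.
theorem workerAllocGoA_round (ws : List Int) (hws : ws ≠ []) :
    ∀ (js : List Int) (cw : Nat), cw < ws.length →
      workerAllocGoA ws js cw [] =
        (js.take (ws.length - cw)).zip (ws.drop cw) ++ workerAllocGoA ws (js.drop (ws.length - cw)) 0 [] := by
  intro js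
  induction js with
  | nil => intro cw _; simp [workerAllocGoA]
  | cons j rest ih =>
    intro cw hcw
    have hdrop : ws.drop cw = ws[cw] :: ws.drop (cw + 1) := List.drop_eq_getElem_cons hcw
    have hget : ws.getD cw 0 = ws[cw] := List.getD_eq_getElem ws 0 hcw
    rw [workerAllocGoA]
    by_cases hge : cw + 1 ≥ ws.length
    · have h1 : ws.length - cw = 1 := by omega
      simp only [hge, if_pos]
      rw [workerAllocGoA_acc ws rest 0 [(j, ws.getD cw 0)]]
      rw [h1, hget, hdrop]
      simp only [List.take_succ_cons, List.take_zero, List.zip, List.zipWith_cons_cons,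
        List.cons_append]
      simp
    · have hlt : cw + 1 < ws.length := by omega
      have htk : ws.length - cw = (ws.length - (cw + 1)) + 1 := by omega
      simp only [hge, if_false]
      rw [workerAllocGoA_acc ws rest _ [(j, ws.getD cw 0)]]
      rw [ih (cw + 1) hlt]
      rw [htk, hget, hdrop]
      simp only [List.take_succ_cons, List.zip, List.zipWith_cons_cons, List.cons_append]
      simp [List.drop_succ_cons]

-- A equals B's round-batched recursion.
theorem workerAllocGoA_eq_rounds (ws : List Int) (hws : ws ≠ []) :
    ∀ (js : List Int), workerAllocGoA ws js 0 [] = workerAllocRounds ws.length ws js := by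
  have hpos : 0 < ws.length := List.length_pos_iff.mpr hws
  suffices h : ∀ (n : Nat) (js : List Int), js.length ≤ n → workerAllocGoA ws js 0 [] = workerAllocRounds ws.length ws js by
    intro js; exact h js.length js le_rfl
  intro n
  induction n with
  | zero =>
    intro js hlen
    have : js = [] := List.eq_nil_of_length_eq_zero (Nat.le_zero.mp hlen)
    subst this
    simp [workerAllocGoA, workerAllocRounds]
  | succ m ih =>
    intro js hlen
    cases js with
    | nil => simp [workerAllocGoA, workerAllocRounds]
    | cons j rest =>
      rw [workerAllocRounds]
      have hne : ws.length ≠ 0 := by omega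
      simp only [hne]
      rw [workerAllocGoA_round ws hws (j :: rest) 0 hpos]
      simp only [Nat.sub_zero, List.drop_zero]
      congr 1
      apply ih
      simp only [List.length_drop, List.length_cons] at *
      omega

-- ===== VERDICT (by name: the statement is the Claim_ definition above) =====
theorem worker_allocation_spec : Claim_equal_worker_allocation := by
  intro jobs workers _ hpre
  unfold Spec_worker_allocation worker_allocation worker_allocation_alt
  exact workerAllocGoA_eq_rounds workers hpre jobs
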